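-- pv_equiv track=rewrite | github.com/the0fficer/Level-4-Project | TrajectoryPlotter.py | BensDet
-- ===== SOURCE A (Python) =====
-- def BensDet(A, total=0):
--     indices = list(range(len(A)))
--     if len(A) == 2 and len(A[0]) == 2:
--         val = A[0][0] * A[1][1] + A[1][0] * A[0][1]
--         return val
--     for fc in indices:
--         As = A[:]
--         As = As[1:]
--         height = len(As)
--
--         for i in range(height):
--             As[i] = As[i][0:fc] + As[i][fc + 1:]
--         sub_det = BensDet(As)
--         total += A[0][fc] * sub_det
--     return total
-- ===== SOURCE B (Python) =====
-- def BensDet(A, total=0):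
--     n = len(A)
--     if n == 2:
--         # 2x2 base case: the direct closed formula
--         return A[0][0] * A[1][1] + A[1][0] * A[0][1]
--     # Subset DP for the permanent: dp[S] = permanent of the bottom
--     # |S| rows of A restricted to the column set S.
--     dp = [0] * (1 << n)
--     dp[0] = 1
--     for S in range(1, 1 << n):
--         k = S.bit_count()
--         row = A[n - k]
--         s = 0
--         for j in range(n):
--             if S >> j & 1:
--                 s += row[j] * dp[S ^ (1 << j)]
--         dp[S] = s
--     return total + dp[(1 << n) - 1]
-- ===== Notes on version B (the rewrite author's own statement) =====
-- stated objective: faster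
-- what changed: Replaced the naive recursive cofactor-style expansion (rebuilding sliced minor matrices at every call) by an iterative bitmask dynamic program over column subsets, dp[S] = permanent of the bottom |S| rows on columns S, keeping the 2x2 direct-formula base case; Pre_ excludes non-square matrices, for which the permanent is undefined and A's slicing result is accidental.
-- intended difference: On the empty matrix (A returns total, dropping the empty permanent 1) and on 1x1 matrices [[x]] with x != 0 (A returns total, dropping x because its recursion bottoms out at 0), B returns total + permanent, the accumulation a maintainer would expect. — e.g. on BensDet([[5]], 0): A returns 0, B returns 5
-- outside the precondition, e.g. on BensDet([[1, 2, 3], [4, 5]], 0): A returns 0, B returns 13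
import Mathlib
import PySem

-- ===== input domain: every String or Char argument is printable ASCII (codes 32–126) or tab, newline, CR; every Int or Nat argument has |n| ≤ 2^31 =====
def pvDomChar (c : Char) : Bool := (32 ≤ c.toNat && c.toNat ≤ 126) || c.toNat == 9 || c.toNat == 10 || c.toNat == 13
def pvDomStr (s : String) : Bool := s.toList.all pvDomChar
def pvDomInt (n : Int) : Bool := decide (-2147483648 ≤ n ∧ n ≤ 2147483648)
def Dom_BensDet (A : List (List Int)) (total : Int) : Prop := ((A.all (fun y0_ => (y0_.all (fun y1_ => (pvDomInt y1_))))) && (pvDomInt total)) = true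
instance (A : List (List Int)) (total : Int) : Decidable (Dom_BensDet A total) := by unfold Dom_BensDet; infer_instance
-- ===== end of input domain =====

-- B replaces A's naive recursive cofactor-style expansion by a bitmask subset DP for the
-- permanent (asymptotically faster), keeping the 2×2 direct-formula base case; on the empty
-- matrix and 1×1 matrices with nonzero entry, where A drops the permanent contribution,
-- B returns the intended total + permanent (see D_BensDet).

-- ===== PORT A =====
-- termination helper for the port's recursion: the inner update loop preserves the length
theorem pv_len_inner (is : List Int) (f : List (List Int) → Int → List Int) :
    ∀ As : List (List Int),
      (is.foldl (fun As i => PySem.List.pySetD As i (f As i)) As).length = As.length := by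
  induction is with
  | nil => intro As; rfl
  | cons i is ih =>
      intro As
      simp only [List.foldl_cons]
      rw [ih]
      exact PySem.List.length_pySetD ..

def BensDet (A : List (List Int)) (total : Int) : Int :=
  let indices := PySem.List.pyRange 0 (PySem.List.len A) 1
  if A.length = 2 ∧ (PySem.List.pyGetD A 0 []).length = 2 then
    PySem.List.pyGetD (PySem.List.pyGetD A 0 []) 0 0 * PySem.List.pyGetD (PySem.List.pyGetD A 1 []) 1 0 +
      PySem.List.pyGetD (PySem.List.pyGetD A 1 []) 0 0 * PySem.List.pyGetD (PySem.List.pyGetD A 0 []) 1 0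
  else
    -- for fc in indices: (attach only carries the membership fact for termination)
    indices.attach.foldl (fun tot fc =>
      let As := PySem.List.slice A none none          -- As = A[:]
      let As := PySem.List.slice As (some 1) none     -- As = As[1:]
      -- for i in range(height): As[i] = As[i][0:fc] + As[i][fc+1:]
      let As2 := (PySem.List.pyRange 0 (PySem.List.len As) 1).foldl
        (fun As i => PySem.List.pySetD As i
          (PySem.List.slice (PySem.List.pyGetD As i []) (some 0) (some fc.1) ++
           PySem.List.slice (PySem.List.pyGetD As i []) (some (fc.1 + 1)) none)) As
      tot + PySem.List.pyGetD (PySem.List.pyGetD A 0 []) fc.1 0 * BensDet As2 0) total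
termination_by A.length
decreasing_by
  have hm := PySem.List.mem_pyRange_one.mp fc.2
  simp only [PySem.List.len_eq] at hm
  rw [pv_len_inner]
  simp [PySem.List.slice_from_one, PySem.List.slice_none_none, List.length_tail]
  omega

-- ===== PORT B =====
def BensDet_alt (A : List (List Int)) (total : Int) : Int :=
  let n := A.length
  if n = 2 then
    -- 2x2 base case: the direct closed formula
    PySem.List.pyGetD (PySem.List.pyGetD A 0 []) 0 0 * PySem.List.pyGetD (PySem.List.pyGetD A 1 []) 1 0 +
      PySem.List.pyGetD (PySem.List.pyGetD A 1 []) 0 0 * PySem.List.pyGetD (PySem.List.pyGetD A 0 []) 1 0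
  else
  let dp := PySem.List.pyRepeat [(0 : Int)] ((1 : Int) <<< n)   -- dp = [0] * (1 << n)

  let dp := PySem.List.pySetD dp 0 1                            -- dp[0] = 1
  let dp := (PySem.List.pyRange 1 ((1 : Int) <<< n) 1).foldl (fun dp S =>
    let k := PySem.Int.bitCount S                               -- k = S.bit_count()
    let row := PySem.List.pyGetD A ((n : Int) - (k : Int)) []   -- row = A[n - k]
    let s := (PySem.List.pyRange 0 (n : Int) 1).foldl (fun s j =>
      -- j ranges over range(n), hence j ≥ 0: 'j.toNat' is exact for Python's 'S >> j', '1 << j'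
      if PySem.Int.band (S >>> j.toNat) 1 ≠ 0 then
        s + PySem.List.pyGetD row j 0 *
            PySem.List.pyGetD dp (PySem.Int.bxor S ((1 : Int) <<< j.toNat)) 0
      else s) 0
    PySem.List.pySetD dp S s) dp
  total + PySem.List.pyGetD dp ((1 : Int) <<< n - 1) 0

-- ===== PRECONDITION & SPEC =====
-- Pre_ excludes non-square inputs: the permanent is only defined for square matrices, and on
-- ragged input A either raises IndexError or returns a value accidental to its slicing.
def Pre_BensDet (A : List (List Int)) (total : Int) : Prop := ∀ r ∈ A, r.length = A.length
instance (A : List (List Int)) (total : Int) : Decidable (Pre_BensDet A total) := by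
  unfold Pre_BensDet; infer_instance
def pvWitness_BensDet : List (List Int) × Int := ([[1, 2], [3, 4]], 0)

-- On the empty matrix (A returns total, dropping the empty permanent 1) and on 1×1 matrices
-- [[x]] with x ≠ 0 (A returns total, dropping x because its recursion bottoms out at 0),
-- B returns the intended total + permanent.
def D_BensDet (A : List (List Int)) (total : Int) : Prop :=
  A.length = 0 ∨ (A.length = 1 ∧ ¬ (A.headD []).headD 0 = 0)
instance (A : List (List Int)) (total : Int) : Decidable (D_BensDet A total) := by
  unfold D_BensDet; infer_instance

def Spec_BensDet (A : List (List Int)) (total : Int) (out : Int) : Prop :=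
  ¬ D_BensDet A total → out = BensDet_alt A total
instance (A : List (List Int)) (total : Int) (out : Int) : Decidable (Spec_BensDet A total out) := by
  unfold Spec_BensDet; infer_instance

def pvDiffWitness_BensDet : List (List Int) × Int := ([[5]], 0)
def pvDiffWitnessOut_BensDet : Int × Int := (0, 5)

-- ===== CLAIM (what is proved, stated in full; the proofs are below) =====
def Claim_unchanged_BensDet : Prop := ∀ (A : List (List Int)) (total : Int),
  Dom_BensDet A total → Pre_BensDet A total → Spec_BensDet A total (BensDet A total)
def Claim_changed_BensDet : Prop :=
  Dom_BensDet (pvDiffWitness_BensDet.1) (pvDiffWitness_BensDet.2) ∧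
  Pre_BensDet (pvDiffWitness_BensDet.1) (pvDiffWitness_BensDet.2) ∧
  D_BensDet (pvDiffWitness_BensDet.1) (pvDiffWitness_BensDet.2) ∧
  BensDet (pvDiffWitness_BensDet.1) (pvDiffWitness_BensDet.2) = pvDiffWitnessOut_BensDet.1 ∧
  BensDet_alt (pvDiffWitness_BensDet.1) (pvDiffWitness_BensDet.2) = pvDiffWitnessOut_BensDet.2 ∧
  pvDiffWitnessOut_BensDet.1 ≠ pvDiffWitnessOut_BensDet.2
def Claim_exact_BensDet : Prop := ∀ (A : List (List Int)) (total : Int),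
  Dom_BensDet A total → Pre_BensDet A total → D_BensDet A total →
  BensDet A total ≠ BensDet_alt A total

-- ===== LEMMAS AND PROOFS =====

-- reference value: permanent of rows `rs` using the column indices `cols`
def permCols : List (List Int) → List Nat → Int
  | [], _ => 1
  | r :: rs, cols => (cols.map (fun j => r.getD j 0 * permCols rs (cols.erase j))).sum


-- `rows` restricted to the columns `cols` (with getD defaults; exact on square input)
def restrictC (cols : List Nat) (r : List Int) : List Int := cols.map (fun j => r.getD j 0)

-- the port's inner update loop is a map over the rows
theorem pv_setloop (f : List Int → List Int) :
    ∀ (suf pre : List (List Int)),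
      (PySem.List.pyRange (pre.length) (pre.length + suf.length) 1).foldl
        (fun As i => PySem.List.pySetD As i (f (PySem.List.pyGetD As i []))) (pre ++ suf)
      = pre ++ suf.map f := by
  intro suf
  induction suf with
  | nil => intro pre; simp [PySem.List.pyRange_one_eq_nil]
  | cons x suf ih =>
      intro pre
      rw [PySem.List.pyRange_one_cons
        (by simp only [List.length_cons]; push_cast; omega)]
      simp only [List.foldl_cons]
      have hget : PySem.List.pyGetD (pre ++ x :: suf) (pre.length : Int) [] = x := by
        simp [List.getD_eq_getElem?_getD]
      have hset : PySem.List.pySetD (pre ++ x :: suf) (pre.length : Int) (f x)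
          = (pre ++ [f x]) ++ suf := by
        simp [List.set_append_right _ _ (Nat.le_refl _)]
      rw [hget, hset]
      have := ih (pre ++ [f x])
      simp only [List.length_append, List.length_cons, List.length_nil, Nat.zero_add] at this ⊢
      have harg2 : ((pre.length : Int) + ((suf.length : Nat) + 1 : Nat))
          = (((pre.length + 1 : Nat)) : Int) + (suf.length : Nat) := by push_cast; ring
      have harg : ((pre.length : Int) + 1) = ((pre.length + 1 : Nat) : Int) := by push_cast; ring
      rw [harg2, harg, this]
      simp

theorem pv_inner_map (fc : Int) (As : List (List Int)) :
    (PySem.List.pyRange 0 (PySem.List.len As) 1).foldl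
      (fun As i => PySem.List.pySetD As i
        (PySem.List.slice (PySem.List.pyGetD As i []) (some 0) (some fc) ++
         PySem.List.slice (PySem.List.pyGetD As i []) (some (fc + 1)) none)) As
    = As.map (fun r => PySem.List.slice r (some 0) (some fc) ++
        PySem.List.slice r (some (fc + 1)) none) := by
  have := pv_setloop
    (fun r => PySem.List.slice r (some 0) (some fc) ++ PySem.List.slice r (some (fc + 1)) none)
    As []
  simpa [PySem.List.len_eq] using this

-- deleting column position k from a restricted row is restricting to cols minus position k
theorem pv_slice_erase (cols : List Nat) (r : List Int) (k : Nat) :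
    PySem.List.slice (restrictC cols r) (some (0 : Int)) (some (k : Int)) ++
      PySem.List.slice (restrictC cols r) (some ((k : Int) + 1)) none
    = restrictC (cols.eraseIdx k) r := by
  have h1 : ((k : Int) + 1) = ((k + 1 : Nat) : Int) := by push_cast; ring
  rw [show ((0:Int)) = ((0:Nat) : Int) from rfl, PySem.List.slice_natCast, h1,
    PySem.List.slice_from_natCast]
  simp only [restrictC, List.eraseIdx_eq_take_drop_succ, List.map_append, List.map_take,
    List.map_drop, Nat.sub_zero, List.drop_zero]

-- positional expansion = value expansion on a nodup column list
theorem pv_bridge : ∀ (cols : List Nat), cols.Nodup → ∀ (F : Nat → List Nat → Int),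
    ((List.range cols.length).map (fun i => F (cols.getD i 0) (cols.eraseIdx i))).sum
      = (cols.map (fun j => F j (cols.erase j))).sum := by
  intro cols
  induction cols with
  | nil => intro _ F; simp
  | cons c cols ih =>
      intro hnd F
      have hc : c ∉ cols := (List.nodup_cons.mp hnd).1
      rw [List.length_cons, List.range_succ_eq_map]
      simp only [List.map_cons, List.map_map, List.sum_cons]
      have htail : ((List.range cols.length).map
          ((fun i => F ((c :: cols).getD i 0) ((c :: cols).eraseIdx i)) ∘ Nat.succ)).sum
          = (cols.map (fun j => F j (c :: cols.erase j))).sum := by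
        rw [show ((fun i => F ((c :: cols).getD i 0) ((c :: cols).eraseIdx i)) ∘ Nat.succ)
            = (fun i => F (cols.getD i 0) (c :: cols.eraseIdx i)) from rfl]
        exact ih (List.nodup_cons.mp hnd).2 (fun j rest => F j (c :: rest))
      rw [htail]
      simp only [List.getD_cons_zero, List.eraseIdx_cons_zero, List.erase_cons_head]
      congr 1
      refine congrArg List.sum (List.map_congr_left ?_)
      intro j hj
      rw [List.erase_cons_tail (by simp only [beq_iff_eq]; rintro rfl; exact hc hj)]

-- characterization of port A on matrices "rows restricted to a column list"
theorem pv_A_char : ∀ (rs : List (List Int)) (cols : List Nat),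
    rs.length = cols.length → cols.Nodup → ∀ total : Int,
    BensDet (rs.map (restrictC cols)) total =
      if cols.length = 2 then permCols rs cols
      else if cols.length ≤ 1 then total
      else total + permCols rs cols := by
  intro rs
  induction rs with
  | nil =>
      intro cols hlen _ total
      rw [BensDet]
      rw [PySem.List.pyRange_one_eq_nil (by simp [PySem.List.len_eq])]
      simp [← hlen]
  | cons r rs ih =>
      intro cols hlen hnd total
      have hMl : ((r :: rs).map (restrictC cols)).length = cols.length := by simpa using hlen
      have hlen' : rs.length + 1 = cols.length := by simpa using hlen
      by_cases hm2 : cols.length = 2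
      · -- A's 2×2 base case
        obtain ⟨c0, c1, rfl⟩ := List.length_eq_two.mp hm2
        have hr : rs.length = 1 := by omega
        obtain ⟨r1, rfl⟩ := List.length_eq_one_iff.mp hr
        have hne : c0 ≠ c1 := by simpa [List.nodup_cons] using hnd
        rw [BensDet]
        rw [if_pos ⟨by simpa using hlen, by simp [restrictC, PySem.List.pyGetD_zero_cons]⟩]
        simp only [List.map_cons, List.map_nil, PySem.List.pyGetD_zero_cons]
        have h1 : PySem.List.pyGetD [restrictC [c0, c1] r, restrictC [c0, c1] r1] 1 []
            = restrictC [c0, c1] r1 := by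
          rw [show (1 : Int) = ((1 : Nat) : Int) from rfl, PySem.List.pyGetD_natCast]; rfl
        rw [h1]
        have e2 : [c0, c1].erase c1 = [c0] := by
          rw [List.erase_cons_tail (by simpa using hne)]; simp
        simp only [permCols, List.erase_cons_head, e2, restrictC, List.map_cons,
          List.map_nil, List.sum_cons, List.sum_nil]
        have g1 : ∀ u v : Int, PySem.List.pyGetD [u, v] 1 0 = v := by
          intro u v
          rw [show (1 : Int) = ((1 : Nat) : Int) from rfl, PySem.List.pyGetD_natCast]; rfl
        simp only [PySem.List.pyGetD_zero_cons, g1]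
        rw [if_pos (show ([c0, c1] : List Nat).length = 2 from rfl)]
        ring
      · -- loop branch
        rw [BensDet]
        rw [if_neg (fun hcontra => hm2 (hMl ▸ hcontra.1))]
        refine Eq.trans (List.foldl_attach
          (f := fun tot fc =>
            let As := PySem.List.slice ((r :: rs).map (restrictC cols)) none none
            let As := PySem.List.slice As (some 1) none
            let As2 := (PySem.List.pyRange 0 (PySem.List.len As) 1).foldl
              (fun As i => PySem.List.pySetD As i
                (PySem.List.slice (PySem.List.pyGetD As i []) (some 0) (some fc) ++
                 PySem.List.slice (PySem.List.pyGetD As i []) (some (fc + 1)) none)) As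
            tot + PySem.List.pyGetD
                (PySem.List.pyGetD ((r :: rs).map (restrictC cols)) 0 []) fc 0 *
              BensDet As2 0)) ?_
        -- the loop body, for fc = k in range(len(A))
        have hbody : ∀ (tot fc : Int),
            fc ∈ PySem.List.pyRange 0 (PySem.List.len ((r :: rs).map (restrictC cols))) 1 →
            (let As := PySem.List.slice ((r :: rs).map (restrictC cols)) none none
             let As := PySem.List.slice As (some 1) none
             let As2 := (PySem.List.pyRange 0 (PySem.List.len As) 1).foldl
               (fun As i => PySem.List.pySetD As i
                 (PySem.List.slice (PySem.List.pyGetD As i []) (some 0) (some fc) ++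
                  PySem.List.slice (PySem.List.pyGetD As i []) (some (fc + 1)) none)) As
             tot + PySem.List.pyGetD
                 (PySem.List.pyGetD ((r :: rs).map (restrictC cols)) 0 []) fc 0 *
               BensDet As2 0)
            = tot + r.getD (cols.getD fc.toNat 0) 0 *
                (if cols.length - 1 = 2 then permCols rs (cols.eraseIdx fc.toNat)
                 else if cols.length - 1 ≤ 1 then 0
                 else permCols rs (cols.eraseIdx fc.toNat)) := by
          intro tot fc hfc
          rw [PySem.List.len_eq, hMl] at hfc
          have h0 := PySem.List.mem_pyRange_one.mp hfc
          have hfck : fc = ((fc.toNat : Nat) : Int) := by omega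
          have hk : fc.toNat < cols.length := by omega
          simp only [List.map_cons, PySem.List.slice_none_none, PySem.List.slice_from_one,
            List.tail_cons]
          rw [pv_inner_map fc (rs.map (restrictC cols))]
          rw [List.map_map]
          have hmin : (rs.map ((fun r' => PySem.List.slice r' (some 0) (some fc) ++
              PySem.List.slice r' (some (fc + 1)) none) ∘ restrictC cols))
              = rs.map (restrictC (cols.eraseIdx fc.toNat)) := by
            refine List.map_congr_left ?_
            intro r' _
            show PySem.List.slice (restrictC cols r') (some 0) (some fc) ++
              PySem.List.slice (restrictC cols r') (some (fc + 1)) none = _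
            rw [hfck]
            exact pv_slice_erase cols r' fc.toNat
          rw [hmin]
          have hBD : BensDet (rs.map (restrictC (cols.eraseIdx fc.toNat))) 0
              = (if cols.length - 1 = 2 then permCols rs (cols.eraseIdx fc.toNat)
                 else if cols.length - 1 ≤ 1 then 0
                 else permCols rs (cols.eraseIdx fc.toNat)) := by
            have hlen2 : rs.length = (cols.eraseIdx fc.toNat).length := by
              rw [List.length_eraseIdx]
              simp [hk]
              omega
            have hnd2 : (cols.eraseIdx fc.toNat).Nodup :=
              (List.eraseIdx_sublist cols fc.toNat).nodup hnd
            rw [ih _ hlen2 hnd2 0]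
            rw [List.length_eraseIdx]
            simp [hk]
          rw [hBD]
          have hget0 : PySem.List.pyGetD (restrictC cols r :: List.map (restrictC cols) rs) 0 []
              = restrictC cols r := PySem.List.pyGetD_zero_cons ..
          rw [hget0, hfck, PySem.List.pyGetD_natCast]
          have hrestr : (restrictC cols r).getD fc.toNat 0 = r.getD (cols.getD fc.toNat 0) 0 := by
            simp [restrictC, List.getD_eq_getElem?_getD, List.getElem?_eq_getElem hk,
              List.getElem?_map]
          rw [hrestr]
          simp only [Int.toNat_natCast]
        rw [PySem.List.foldl_congr_mem _ _ _ _ hbody]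
        rw [PySem.List.foldl_add
          (PySem.List.pyRange 0 (PySem.List.len ((r :: rs).map (restrictC cols))) 1)
          (fun fc => r.getD (cols.getD fc.toNat 0) 0 *
            (if cols.length - 1 = 2 then permCols rs (cols.eraseIdx fc.toNat)
             else if cols.length - 1 ≤ 1 then 0
             else permCols rs (cols.eraseIdx fc.toNat))) total]
        rw [PySem.List.len_eq, hMl, PySem.List.pyRange_one]
        simp only [Int.sub_zero, Int.toNat_natCast, List.map_map]
        have hsum : ((List.range cols.length).map ((fun fc => r.getD (cols.getD fc.toNat 0) 0 *
            (if cols.length - 1 = 2 then permCols rs (cols.eraseIdx fc.toNat)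
             else if cols.length - 1 ≤ 1 then 0
             else permCols rs (cols.eraseIdx fc.toNat))) ∘ fun k : Nat => (0 : Int) + (k : Int)))
            = (List.range cols.length).map (fun k => r.getD (cols.getD k 0) 0 *
            (if cols.length - 1 = 2 then permCols rs (cols.eraseIdx k)
             else if cols.length - 1 ≤ 1 then 0
             else permCols rs (cols.eraseIdx k))) := by
          refine List.map_congr_left ?_
          intro k _
          simp
        rw [hsum]
        by_cases hm1 : cols.length ≤ 1
        · -- n = 1: the single minor is empty and A adds x·0
          have hc1 : cols.length = 1 := by omega
          obtain ⟨c, rfl⟩ := List.length_eq_one_iff.mp hc1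
          simp [hm2, hm1, permCols]
        · -- n ≥ 3: every minor value is its permanent
          have hifP : ∀ k, k < cols.length →
              (if cols.length - 1 = 2 then permCols rs (cols.eraseIdx k)
               else if cols.length - 1 ≤ 1 then 0
               else permCols rs (cols.eraseIdx k)) = permCols rs (cols.eraseIdx k) := by
            intro k _
            split_ifs with h1 h2
            · rfl
            · omega
            · rfl
          have hsum2 : (List.range cols.length).map (fun k => r.getD (cols.getD k 0) 0 *
              (if cols.length - 1 = 2 then permCols rs (cols.eraseIdx k)
               else if cols.length - 1 ≤ 1 then 0
               else permCols rs (cols.eraseIdx k)))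
              = (List.range cols.length).map (fun k =>
                  (fun j rest => r.getD j 0 * permCols rs rest) (cols.getD k 0) (cols.eraseIdx k)) := by
            refine List.map_congr_left ?_
            intro k hkr
            rw [hifP k (List.mem_range.mp hkr)]
          rw [hsum2, pv_bridge cols hnd (fun j rest => r.getD j 0 * permCols rs rest)]
          rw [if_neg hm2, if_neg hm1]
          rfl

-- ======== B side ========

-- the set bits below n, in increasing order
def pvBits (n S : Nat) : List Nat := (List.range n).filter (fun j => S.testBit j)

theorem pv_bits_nodup (n S : Nat) : (pvBits n S).Nodup :=
  (List.nodup_range).filter _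

theorem pv_bits_le (n S : Nat) : (pvBits n S).length ≤ n := by
  simpa using List.length_filter_le (fun j => S.testBit j) (List.range n)

theorem pv_bits_zero (n : Nat) : pvBits n 0 = [] := by
  simp [pvBits]

theorem pv_bits_pos (n S : Nat) (hS : 0 < S) (h : S < 2 ^ n) : 0 < (pvBits n S).length := by
  rcases Nat.eq_zero_or_pos (pvBits n S).length with h0 | h1
  · exfalso
    have hempty : pvBits n S = [] := List.length_eq_zero_iff.mp h0
    have : S = 0 := by
      apply Nat.eq_of_testBit_eq
      intro i
      rcases Nat.lt_or_ge i n with hin | hin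
      · by_contra hne
        have : i ∈ pvBits n S := by
          simp only [pvBits, List.mem_filter, List.mem_range]
          exact ⟨hin, by simpa using hne⟩
        simp [hempty] at this
      · rw [Nat.testBit_lt_two_pow (Nat.lt_of_lt_of_le h (Nat.pow_le_pow_right (by omega) hin))]
        simp
    omega
  · exact h1

theorem pv_popcount (n : Nat) : ∀ S : Nat, S < 2 ^ n →
    PySem.Int.bitCount (S : Int) = (pvBits n S).length := by
  induction n with
  | zero =>
      intro S hS
      have : S = 0 := by simpa using hS
      subst this
      simp [pv_bits_zero, PySem.Int.bitCount_zero]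
  | succ n ih =>
      intro S hS
      rcases Nat.eq_zero_or_pos S with rfl | hpos
      · simp [pv_bits_zero, PySem.Int.bitCount_zero]
      · rw [PySem.Int.bitCount_natCast hpos, ih (S / 2) (by omega)]
        have hsplit : pvBits (n + 1) S
            = (if S.testBit 0 then [0] else []) ++ ((pvBits n (S / 2)).map Nat.succ) := by
          simp only [pvBits, List.range_succ_eq_map, List.filter_cons]
          rcases hb : S.testBit 0 <;>
            simp [hb, List.filter_map, Function.comp_def, Nat.testBit_add_one]
        rw [hsplit]
        rcases hb : S.testBit 0
        · have : S % 2 = 0 := by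
            have := Nat.testBit_zero S
            simp [hb] at this
            omega
          simp [hb, this]
        · have : S % 2 = 1 := by
            have := Nat.testBit_zero S
            simp [hb] at this
            omega
          simp [hb, this]
          omega

theorem pv_xor_lt (S j : Nat) (h : S.testBit j) : S ^^^ 2 ^ j < S := by
  apply Nat.lt_of_testBit j (by simp [Nat.testBit_xor, h]) h
  intro k hk
  simp [Nat.testBit_xor, Nat.testBit_two_pow, Nat.ne_of_lt hk]

theorem pv_bits_xor (n S j : Nat) (h : S.testBit j) :
    pvBits n (S ^^^ 2 ^ j) = (pvBits n S).erase j := by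
  rw [(pv_bits_nodup n S).erase_eq_filter]
  simp only [pvBits, List.filter_filter]
  refine List.filter_congr ?_
  intro i _
  rcases eq_or_ne i j with rfl | hne
  · simp [Nat.testBit_xor, h, Nat.testBit_two_pow]
  · simp [Nat.testBit_xor, Nat.testBit_two_pow, hne, Ne.symm hne]

theorem pv_bits_full (n : Nat) : pvBits n (2 ^ n - 1) = List.range n := by
  refine List.filter_eq_self.mpr ?_
  intro i hi
  simp [Nat.testBit_two_pow_sub_one, List.mem_range.mp hi]

theorem pv_getD_set (xs : List Int) (m : Nat) (s : Int) (S : Nat) (h : m < xs.length) :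
    (xs.set m s).getD S 0 = if S = m then s else xs.getD S 0 := by
  simp only [List.getD_eq_getElem?_getD, List.getElem?_set]
  by_cases h1 : m = S
  · subst h1; simp [h]
  · simp [h1, Ne.symm h1]

-- the DP step and state of port B, named for the proofs (definitionally the port's loop body)
def pvStep (A : List (List Int)) (dp : List Int) (S : Int) : List Int :=
  PySem.List.pySetD dp S ((PySem.List.pyRange 0 (A.length : Int) 1).foldl (fun s j =>
    if PySem.Int.band (S >>> j.toNat) 1 ≠ 0 then
      s + PySem.List.pyGetD (PySem.List.pyGetD A
            ((A.length : Int) - (PySem.Int.bitCount S : Int)) []) j 0 *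
          PySem.List.pyGetD dp (PySem.Int.bxor S ((1 : Int) <<< j.toNat)) 0
    else s) 0)

def pvDP (A : List (List Int)) (m : Nat) : List Int :=
  (PySem.List.pyRange 1 (m : Int) 1).foldl (pvStep A)
    (PySem.List.pySetD (PySem.List.pyRepeat [(0 : Int)] ((2 ^ A.length : Nat) : Int)) 0 1)

theorem pv_dp0_eq (A : List (List Int)) :
    PySem.List.pySetD (PySem.List.pyRepeat [(0 : Int)] ((2 ^ A.length : Nat) : Int)) 0 1
      = (List.replicate (2 ^ A.length) (0 : Int)).set 0 1 := by
  rw [show ((0 : Int)) = ((0 : Nat) : Int) from rfl, PySem.List.pySetD_natCast,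
    PySem.List.pyRepeat_singleton, Int.toNat_natCast]

-- the inner loop of the step computes the expansion over the set bits of S
theorem pv_step_sum (A : List (List Int)) (dp : List Int) (m : Nat) :
    (PySem.List.pyRange 0 (A.length : Int) 1).foldl (fun s j =>
      if PySem.Int.band (((m : Nat) : Int) >>> j.toNat) 1 ≠ 0 then
        s + PySem.List.pyGetD (PySem.List.pyGetD A
              ((A.length : Int) - (PySem.Int.bitCount ((m : Nat) : Int) : Int)) []) j 0 *
            PySem.List.pyGetD dp (PySem.Int.bxor ((m : Nat) : Int) ((1 : Int) <<< j.toNat)) 0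
      else s) 0
    = ((pvBits A.length m).map (fun j =>
        (PySem.List.pyGetD A
            ((A.length : Int) - (PySem.Int.bitCount ((m : Nat) : Int) : Int)) []).getD j 0 *
        dp.getD (m ^^^ 2 ^ j) 0)).sum := by
  rw [PySem.List.pyRange_one]
  simp only [Int.sub_zero, Int.toNat_natCast]
  rw [List.foldl_map]
  have hbody : ∀ (s : Int), ∀ jk ∈ List.range A.length,
      (if PySem.Int.band (((m : Nat) : Int) >>>
            (((((0 : Int) + (jk : Int)).toNat : Nat)) : Int)) 1 ≠ 0 then
        s + PySem.List.pyGetD (PySem.List.pyGetD A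
              ((A.length : Int) - (PySem.Int.bitCount ((m : Nat) : Int) : Int)) [])
              ((0 : Int) + (jk : Int)) 0 *
            PySem.List.pyGetD dp (PySem.Int.bxor ((m : Nat) : Int)
              ((1 : Int) <<< ((0 : Int) + (jk : Int)).toNat)) 0
      else s)
      = if m.testBit jk = true then
          s + (PySem.List.pyGetD A
                ((A.length : Int) - (PySem.Int.bitCount ((m : Nat) : Int) : Int)) []).getD jk 0 *
              dp.getD (m ^^^ 2 ^ jk) 0
        else s := by
    intro s jk _
    simp only [zero_add, Int.toNat_natCast]
    have hshift : ((m : Int) >>> ((jk : Nat) : Int)) = ((m >>> jk : Nat) : Int) := by simp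
    have hsl : ((1 : Int) <<< jk) = ((2 ^ jk : Nat) : Int) := by
      rw [Int.shiftLeft_eq]; push_cast; ring
    rw [hshift, hsl, PySem.Int.bxor_natCast, PySem.List.pyGetD_natCast,
      PySem.List.pyGetD_natCast]
    rw [show (1 : Int) = ((1 : Nat) : Int) from rfl, PySem.Int.band_natCast]
    have hcond : (((m >>> jk) &&& 1 : Nat) : Int) ≠ 0 ↔ m.testBit jk = true := by
      rw [Int.natCast_ne_zero, Nat.testBit, Nat.and_comm 1, Nat.and_one_is_mod]
      simp
      try omega
    by_cases hb : m.testBit jk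
    · rw [if_pos (hcond.mpr hb), if_pos hb]
    · rw [if_neg (fun hc => hb (hcond.mp hc)), if_neg hb]
  rw [PySem.List.foldl_congr_mem _ _ _ _ hbody]
  rw [PySem.List.foldl_ite_eq_foldl_filter (p := fun jk => m.testBit jk = true)]
  rw [show (List.filter (fun jk => decide (m.testBit jk = true)) (List.range A.length))
      = pvBits A.length m by simp [pvBits]]
  rw [PySem.List.foldl_add]
  simp

-- invariant of port B's DP loop
theorem pv_dp_loop (A : List (List Int)) : ∀ m : Nat, m ≤ 2 ^ A.length →
    (pvDP A m).length = 2 ^ A.length ∧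
    ∀ S : Nat, S < m →
      (pvDP A m).getD S 0
        = permCols (A.drop (A.length - (pvBits A.length S).length)) (pvBits A.length S) := by
  intro m
  induction m with
  | zero =>
      intro _
      refine ⟨?_, by omega⟩
      rw [pvDP, PySem.List.pyRange_one_eq_nil (by norm_num), List.foldl_nil, pv_dp0_eq]
      simp
  | succ m ih =>
      intro hm
      have ihm := ih (by omega)
      rcases Nat.eq_zero_or_pos m with rfl | hmpos
      · -- first iteration has not run yet; only dp[0] = 1 is claimed
        constructor
        · rw [pvDP, PySem.List.pyRange_one_eq_nil (by norm_num), List.foldl_nil, pv_dp0_eq]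
          simp
        · intro S hS
          have : S = 0 := by omega
          subst this
          rw [pvDP, PySem.List.pyRange_one_eq_nil (by norm_num), List.foldl_nil, pv_dp0_eq]
          rw [pv_getD_set _ _ _ _ (by simpa using Nat.two_pow_pos A.length)]
          simp [pv_bits_zero, permCols]
      · -- peel the last iteration S = m
        have hstep : pvDP A (m + 1) = pvStep A (pvDP A m) ((m : Nat) : Int) := by
          rw [pvDP, pvDP,
            show (((m + 1 : Nat)) : Int) = ((m : Nat) : Int) + 1 by push_cast; ring,
            PySem.List.pyRange_one_succ_right (by omega), List.foldl_append,
            List.foldl_cons, List.foldl_nil]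
        have hlen : (pvDP A m).length = 2 ^ A.length := ihm.1
        have hmlt : m < 2 ^ A.length := by omega
        have hK1 : 0 < (pvBits A.length m).length := pv_bits_pos _ _ hmpos hmlt
        have hKn : (pvBits A.length m).length ≤ A.length := pv_bits_le _ _
        have hstep2 : pvDP A (m + 1) = (pvDP A m).set m
            (((pvBits A.length m).map (fun j =>
              (PySem.List.pyGetD A ((A.length : Int) -
                (PySem.Int.bitCount ((m : Nat) : Int) : Int)) []).getD j 0 *
              (pvDP A m).getD (m ^^^ 2 ^ j) 0)).sum) := by
          rw [hstep, pvStep, pv_step_sum A (pvDP A m) m, PySem.List.pySetD_natCast]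
        constructor
        · rw [hstep2]; simp [hlen]
        · intro S hS
          rw [hstep2, pv_getD_set _ _ _ _ (by omega)]
          by_cases hSm : S = m
          · subst hSm
            rw [if_pos rfl]
            rw [pv_popcount A.length S hmlt]
            have hrow : PySem.List.pyGetD A
                ((A.length : Int) - (((pvBits A.length S).length : Nat) : Int)) []
                = A.getD (A.length - (pvBits A.length S).length) [] := by
              rw [show ((A.length : Int) - (((pvBits A.length S).length : Nat) : Int))
                  = ((A.length - (pvBits A.length S).length : Nat) : Int) by omega]
              exact PySem.List.pyGetD_natCast ..
            rw [hrow]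
            have hidx : A.length - (pvBits A.length S).length < A.length := by omega
            have hdrop : A.drop (A.length - (pvBits A.length S).length)
                = A.getD (A.length - (pvBits A.length S).length) [] ::
                  A.drop (A.length - (pvBits A.length S).length + 1) := by
              rw [List.drop_eq_getElem_cons hidx]
              congr 1
              simp [List.getD_eq_getElem?_getD, List.getElem?_eq_getElem hidx]
            rw [hdrop, permCols]
            refine congrArg List.sum (List.map_congr_left ?_)
            intro j hj
            have hjbit : S.testBit j := by
              have := List.mem_filter.mp hj
              simpa using this.2
            have hxorlt : S ^^^ 2 ^ j < S := pv_xor_lt S j hjbit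
            rw [ihm.2 (S ^^^ 2 ^ j) (by omega)]
            rw [pv_bits_xor _ _ _ hjbit]
            rw [List.length_erase_of_mem hj]
            rw [show A.length - ((pvBits A.length S).length - 1)
                = A.length - (pvBits A.length S).length + 1 by omega]
          · rw [if_neg hSm]
            exact ihm.2 S (by omega)

-- characterization of port B: the 2×2 closed formula, else total + permanent
theorem pv_B_char (A : List (List Int)) (total : Int) :
    BensDet_alt A total
      = if A.length = 2 then
          PySem.List.pyGetD (PySem.List.pyGetD A 0 []) 0 0 * PySem.List.pyGetD (PySem.List.pyGetD A 1 []) 1 0 +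
            PySem.List.pyGetD (PySem.List.pyGetD A 1 []) 0 0 * PySem.List.pyGetD (PySem.List.pyGetD A 0 []) 1 0
        else total + permCols A (List.range A.length) := by
  by_cases h2 : A.length = 2
  · rw [BensDet_alt, if_pos h2, if_pos h2]
  · rw [if_neg h2]
    have halt : BensDet_alt A total
        = total + PySem.List.pyGetD (pvDP A (2 ^ A.length)) (((2 ^ A.length : Nat) : Int) - 1) 0 := by
      rw [BensDet_alt, if_neg h2]
      rw [show ((1 : Int) <<< A.length) = ((2 ^ A.length : Nat) : Int) by
        rw [Int.shiftLeft_eq]; push_cast; ring]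
      rfl
    have h1 : 1 ≤ 2 ^ A.length := Nat.one_le_two_pow
    have hval : PySem.List.pyGetD (pvDP A (2 ^ A.length)) (((2 ^ A.length : Nat) : Int) - 1) 0
        = permCols A (List.range A.length) := by
      rw [show (((2 ^ A.length : Nat) : Int) - 1) = (((2 ^ A.length - 1 : Nat)) : Int) by omega,
        PySem.List.pyGetD_natCast]
      rw [(pv_dp_loop A (2 ^ A.length) (le_refl _)).2 (2 ^ A.length - 1) (by omega)]
      rw [pv_bits_full]
      simp
    rw [halt, hval]

-- ======== assembling the claims ========

theorem pv_restrict_id (r : List Int) : restrictC (List.range r.length) r = r := by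
  apply List.ext_getElem (by simp [restrictC])
  intro i h1 h2
  simp [restrictC, List.getD_eq_getElem?_getD, List.getElem?_eq_getElem h2]

theorem pv_A_value (A : List (List Int)) (total : Int) (hpre : Pre_BensDet A total) :
    BensDet A total
      = if A.length = 2 then permCols A (List.range A.length)
        else if A.length ≤ 1 then total
        else total + permCols A (List.range A.length) := by
  have hmap : List.map (restrictC (List.range A.length)) A = A := by
    have := List.map_congr_left (l := A)
      (f := restrictC (List.range A.length)) (g := fun r => r)
      (fun r hr => by rw [← hpre r hr]; exact pv_restrict_id r)
    simpa using this
  have h := pv_A_char A (List.range A.length) (by simp) List.nodup_range total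
  rw [hmap] at h
  simpa using h

theorem pv_main (A : List (List Int)) (total : Int) (hpre : Pre_BensDet A total)
    (hnd : ¬ D_BensDet A total) : BensDet A total = BensDet_alt A total := by
  rw [pv_B_char, pv_A_value A total hpre]
  rcases A with _ | ⟨r, rs⟩
  · exact absurd (Or.inl rfl) hnd
  rcases rs with _ | ⟨r2, rs2⟩
  · -- n = 1: ¬D forces the entry to be 0, and both sides are total
    have hr : r.length = 1 := by simpa using hpre r (by simp)
    obtain ⟨x, rfl⟩ := List.length_eq_one_iff.mp hr
    have hx : x = 0 := by
      by_contra hx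
      exact hnd (Or.inr ⟨by simp, by simpa using hx⟩)
    subst hx
    simp [permCols]
  rcases rs2 with _ | ⟨r3, rs3⟩
  · -- n = 2: both sides are the 2×2 closed formula
    have hr : r.length = 2 := by simpa using hpre r (by simp)
    have hr2 : r2.length = 2 := by simpa using hpre r2 (by simp)
    obtain ⟨x, y, rfl⟩ := List.length_eq_two.mp hr
    obtain ⟨z, w, rfl⟩ := List.length_eq_two.mp hr2
    rw [if_pos (by simp), if_pos (by simp)]
    rw [show ([[x, y], [z, w]] : List (List Int)).length = 2 from rfl,
      show List.range 2 = [0, 1] from rfl]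
    norm_num [permCols, List.erase, PySem.List.pyGetD, PySem.List.pyIdx?,
      show ((0 : Nat) == 1) = false from rfl, show ((1 : Nat) == 0) = false from rfl]
    ring
  · -- n ≥ 3
    rw [if_neg (by simp), if_neg (by simp), if_neg (by simp)]

theorem pv_tight (A : List (List Int)) (total : Int) (hpre : Pre_BensDet A total)
    (hd : D_BensDet A total) : BensDet A total ≠ BensDet_alt A total := by
  rw [pv_B_char, pv_A_value A total hpre]
  rcases hd with h0 | ⟨h1, hx⟩
  · -- n = 0: A gives total, B gives total + 1
    obtain rfl := List.length_eq_zero_iff.mp h0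
    simp [permCols]
  · -- n = 1 with nonzero entry
    obtain ⟨r, rfl⟩ := List.length_eq_one_iff.mp h1
    have hr : r.length = 1 := by simpa using hpre r (by simp)
    obtain ⟨x, rfl⟩ := List.length_eq_one_iff.mp hr
    have hx' : x ≠ 0 := by simpa using hx
    simp [permCols]
    omega

-- ===== VERDICT (by name: the statement is the Claim_ definition above) =====
theorem BensDet_spec : Claim_unchanged_BensDet := by
  intro A total _ hpre hnd
  exact pv_main A total hpre hnd

theorem BensDet_changed : Claim_changed_BensDet := by
  unfold Claim_changed_BensDet
  refine ⟨by decide, by decide, by decide, ?_, by decide, by decide⟩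
  show BensDet [[5]] 0 = 0
  rw [pv_A_value [[5]] 0 (by decide)]
  norm_num

theorem BensDet_tight : Claim_exact_BensDet := by
  intro A total _ hpre hd
  exact pv_tight A total hpre hd
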